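-- pv_equiv track=rewrite | github.com/benbinkert/experimental-analysis-flank-topography-gears | Code/korrelationsAnalyse.py | cluster_boxes_from_order
-- ===== SOURCE A (Python) =====
-- def cluster_boxes_from_order(order_cols: list[str], cluster_map: dict):
--     """
--     Bestimmt Boxen für zusammenhängende Clusterblöcke in der sortierten Reihenfolge.
--
--     Was kann man damit machen?
--     - In der Heatmap rote Rahmen um Clusterblöcke zeichnen
--     - Visualisierung mit Start- und Endindizes vorbereiten
--
--     Rückgabe:
--     - Liste von Tupeln (Cluster-ID, Startindex, Endindex)
--     """
--     boxes = []
--     if not order_cols: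
--         return boxes
--
--     current = cluster_map.get(order_cols[0], None)
--     start = 0
--
--     for i, p in enumerate(order_cols[1:], start=1):
--         cid = cluster_map.get(p, None)
--         if cid != current:
--             boxes.append((current, start, i - 1))
--             current = cid
--             start = i
--
--     boxes.append((current, start, len(order_cols) - 1))
--     return boxes
-- ===== SOURCE B (Python) =====
-- def cluster_boxes_from_order(order_cols: list[str], cluster_map: dict):
--     """Two-pass boundary form: map ids once, collect boundary indices, zip into boxes."""
--     if not order_cols:
--         return []
--     cids = [cluster_map.get(p) for p in order_cols]
--     n = len(order_cols)
--     bounds = [0] + [i for i in range(1, n) if cids[i] != cids[i - 1]] + [n]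
--     return [(cids[s], s, e - 1) for s, e in zip(bounds, bounds[1:])]
-- ===== Notes on version B (the rewrite author's own statement) =====
-- stated objective: alternative
-- what changed: A's single stateful loop (tracking current id, run start and appending on change) is replaced by a two-pass boundary decomposition: map cluster ids once, collect the indices where the id changes, then zip consecutive boundaries into (id, start, end) boxes.
import Mathlib
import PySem

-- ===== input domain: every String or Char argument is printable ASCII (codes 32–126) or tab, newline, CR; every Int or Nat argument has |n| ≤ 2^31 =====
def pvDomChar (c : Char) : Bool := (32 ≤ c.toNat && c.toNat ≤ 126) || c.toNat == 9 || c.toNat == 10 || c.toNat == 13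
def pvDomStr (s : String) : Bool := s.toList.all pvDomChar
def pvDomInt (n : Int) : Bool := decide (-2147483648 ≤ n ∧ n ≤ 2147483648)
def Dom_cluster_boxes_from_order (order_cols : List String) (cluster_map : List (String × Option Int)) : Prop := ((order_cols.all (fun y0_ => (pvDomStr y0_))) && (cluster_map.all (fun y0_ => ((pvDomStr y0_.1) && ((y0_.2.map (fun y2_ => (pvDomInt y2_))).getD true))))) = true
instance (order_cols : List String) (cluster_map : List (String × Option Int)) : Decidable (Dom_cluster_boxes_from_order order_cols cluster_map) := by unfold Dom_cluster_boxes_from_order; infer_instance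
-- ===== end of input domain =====

-- B replaces A's stateful single loop by a two-pass boundary decomposition
-- (map cluster ids once, collect change indices, zip consecutive boundaries); same cost, different structure.

-- ===== PORT A =====
-- the for-loop of A: state (i, current, start, boxes), one step per element of order_cols[1:]
def pvLoopA (cluster_map : List (String × Option Int)) :
    List String → Int → Option Int → Int → List (Option Int × Int × Int) →
    List (Option Int × Int × Int) × Option Int × Int
  | [], _, current, start, boxes => (boxes, current, start)
  | p :: ps, i, current, start, boxes =>
    let cid := PySem.Dict.getD (PySem.Dict.mk cluster_map) p none
    if cid ≠ current then
      pvLoopA cluster_map ps (i + 1) cid i (boxes ++ [(current, start, i - 1)])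
    else
      pvLoopA cluster_map ps (i + 1) current start boxes

def cluster_boxes_from_order (order_cols : List String) (cluster_map : List (String × Option Int)) : List (Option Int × Int × Int) :=
  match order_cols with
  | [] => []
  | p0 :: rest =>
    let current := PySem.Dict.getD (PySem.Dict.mk cluster_map) p0 none
    let r := pvLoopA cluster_map rest 1 current 0 []
    r.1 ++ [(r.2.1, r.2.2, (order_cols.length : Int) - 1)]

-- ===== PORT B =====
def cluster_boxes_from_order_alt (order_cols : List String) (cluster_map : List (String × Option Int)) : List (Option Int × Int × Int) :=
  if order_cols = [] then []
  else
    let cids : List (Option Int) := order_cols.map (fun p => PySem.Dict.getD (PySem.Dict.mk cluster_map) p none)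
    let n := order_cols.length
    let bounds : List Nat :=
      [0] ++ (List.range' 1 (n - 1)).filter (fun i => decide (cids.getD i none ≠ cids.getD (i - 1) none)) ++ [n]
    (bounds.zip bounds.tail).map (fun se => (cids.getD se.1 none, (se.1 : Int), (se.2 : Int) - 1))

-- ===== PRECONDITION & SPEC =====
def Spec_cluster_boxes_from_order (order_cols : List String) (cluster_map : List (String × Option Int)) (out : List (Option Int × Int × Int)) : Prop := out = cluster_boxes_from_order_alt order_cols cluster_map
instance (order_cols : List String) (cluster_map : List (String × Option Int)) (out : List (Option Int × Int × Int)) : Decidable (Spec_cluster_boxes_from_order order_cols cluster_map out) := by unfold Spec_cluster_boxes_from_order; infer_instance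

-- ===== CLAIM (what is proved, stated in full; the proofs are below) =====
def Claim_equal_cluster_boxes_from_order : Prop := ∀ (order_cols : List String) (cluster_map : List (String × Option Int)), Dom_cluster_boxes_from_order order_cols cluster_map → Spec_cluster_boxes_from_order order_cols cluster_map (cluster_boxes_from_order order_cols cluster_map)

-- ===== LEMMAS AND PROOFS =====

-- common normal form: the run decomposition of the id list cs starting at index i,
-- with the current run's id `cur` open since index `st`
def pvF : Option Int → Nat → Nat → List (Option Int) → List (Option Int × Int × Int)
  | cur, st, i, [] => [(cur, (st : Int), (i : Int) - 1)]
  | cur, st, i, c :: cs =>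
    if c ≠ cur then (cur, (st : Int), (i : Int) - 1) :: pvF c i (i + 1) cs
    else pvF cur st (i + 1) cs

def pvZipMap (g : Nat → Option Int) (q : List Nat) : List (Option Int × Int × Int) :=
  (q.zip q.tail).map (fun se => (g se.1, (se.1 : Int), (se.2 : Int) - 1))

lemma pvLoopA_eq_pvF (cm : List (String × Option Int)) :
    ∀ (ps : List String) (i st : Nat) (cur : Option Int) (boxes : List (Option Int × Int × Int)),
    (pvLoopA cm ps (i : Int) cur (st : Int) boxes).1 ++
      [((pvLoopA cm ps (i : Int) cur (st : Int) boxes).2.1,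
        (pvLoopA cm ps (i : Int) cur (st : Int) boxes).2.2,
        ((i + ps.length : Nat) : Int) - 1)]
    = boxes ++ pvF cur st i (ps.map (fun p => PySem.Dict.getD (PySem.Dict.mk cm) p none)) := by
  intro ps
  induction ps with
  | nil => intro i st cur boxes; simp [pvLoopA, pvF]
  | cons p ps ih =>
    intro i st cur boxes
    have hL : i + (p :: ps).length = (i + 1) + ps.length := by
      simp [List.length_cons]; omega
    have h1 : ((i : Int) + 1) = ((i + 1 : Nat) : Int) := by push_cast; ring
    simp only [pvLoopA, List.map_cons, pvF]
    by_cases h : PySem.Dict.getD (PySem.Dict.mk cm) p none ≠ cur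
    · rw [if_pos h, hL, h1, ih (i + 1) i _ (boxes ++ [(cur, (st : Int), (i : Int) - 1)])]
      simp [List.append_assoc]
      exact fun h' => absurd h' h
    · rw [if_neg h, hL, h1, ih (i + 1) st cur boxes]
      rw [if_neg h]

lemma pvZipMap_eq_pvF (cids : List (Option Int)) :
    ∀ (cs : List (Option Int)) (st i : Nat),
    i ≤ cids.length → cs = cids.drop i → st < i →
    (∀ j, st < j → j < i → cids.getD j none = cids.getD st none) →
    pvZipMap (fun j => cids.getD j none)
      (st :: ((List.range' i (cids.length - i)).filter
        (fun j => decide (cids.getD j none ≠ cids.getD (j - 1) none)) ++ [cids.length]))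
    = pvF (cids.getD st none) st i cs := by
  intro cs
  induction cs with
  | nil =>
    intro st i hle hdrop hst _
    have hin : i = cids.length := by
      have := List.drop_eq_nil_iff.mp hdrop.symm
      omega
    subst hin
    simp [pvZipMap, pvF]
  | cons c cs ih =>
    intro st i hle hdrop hst huni
    have hi : i < cids.length := by
      by_contra h
      have hnil : cids.drop i = [] := List.drop_eq_nil_iff.mpr (by omega)
      rw [hnil] at hdrop
      simp at hdrop
    have hgi : cids.getD i none = c := by
      have h0 : cids[i]? = some c := by
        have h : (cids.drop i)[(0 : Nat)]? = some c := by rw [← hdrop]; rfl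
        rw [List.getElem?_drop] at h
        simpa using h
      simp [List.getD_eq_getElem?_getD, h0]
    have hcs : cs = cids.drop (i + 1) := by
      have h : (c :: cs).tail = cids.drop (i + 1) := by rw [hdrop, List.tail_drop]
      simpa using h
    have hrange : List.range' i (cids.length - i) = i :: List.range' (i + 1) (cids.length - (i + 1)) := by
      have hn : cids.length - i = (cids.length - (i + 1)) + 1 := by omega
      rw [hn, List.range'_succ]
    have hgprev : cids.getD (i - 1) none = cids.getD st none := by
      rcases Nat.lt_or_ge st (i - 1) with h | h
      · exact huni (i - 1) h (by omega)
      · have hs : st = i - 1 := by omega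
        rw [hs]
    rw [hrange, List.filter_cons]
    by_cases hc : c ≠ cids.getD st none
    · have hP : (decide (cids.getD i none ≠ cids.getD (i - 1) none)) = true := by
        rw [hgi, hgprev]; simpa using hc
      rw [if_pos hP]
      have step : pvZipMap (fun j => cids.getD j none)
          (st :: (i :: (List.range' (i + 1) (cids.length - (i + 1))).filter
            (fun j => decide (cids.getD j none ≠ cids.getD (j - 1) none)) ++ [cids.length]))
          = (cids.getD st none, (st : Int), (i : Int) - 1) ::
            pvZipMap (fun j => cids.getD j none)
            (i :: ((List.range' (i + 1) (cids.length - (i + 1))).filter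
              (fun j => decide (cids.getD j none ≠ cids.getD (j - 1) none)) ++ [cids.length])) := by
        simp [pvZipMap]
      rw [step, ih i (i + 1) (by omega) hcs (by omega)
        (by intro j h1 h2; exact absurd h1 (by omega))]
      rw [hgi]
      simp only [pvF]
      rw [if_pos hc]
    · have hP : (decide (cids.getD i none ≠ cids.getD (i - 1) none)) = false := by
        push_neg at hc
        rw [hgi, hgprev]
        simp [hc]
      rw [if_neg (by rw [hP]; simp)]
      rw [ih st (i + 1) (by omega) hcs (by omega)
        (by
          intro j h1 h2
          rcases Nat.lt_or_ge j i with h | h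
          · exact huni j h1 h
          · have hj : j = i := by omega
            push_neg at hc
            rw [hj, hgi, hc])]
      simp only [pvF]
      rw [if_neg hc]

-- ===== VERDICT (by name: the statement is the Claim_ definition above) =====
theorem cluster_boxes_from_order_spec : Claim_equal_cluster_boxes_from_order := by
  intro order_cols cluster_map _
  unfold Spec_cluster_boxes_from_order
  cases order_cols with
  | nil => rfl
  | cons p0 rest =>
    have hA := pvLoopA_eq_pvF cluster_map rest 1 0
      (PySem.Dict.getD (PySem.Dict.mk cluster_map) p0 none) []
    have e : 1 + rest.length = rest.length + 1 := Nat.add_comm 1 _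
    rw [e] at hA
    simp only [Nat.cast_one, Nat.cast_zero, List.nil_append] at hA
    have key := pvZipMap_eq_pvF
      ((p0 :: rest).map (fun p => PySem.Dict.getD (PySem.Dict.mk cluster_map) p none))
      (rest.map (fun p => PySem.Dict.getD (PySem.Dict.mk cluster_map) p none)) 0 1
      (by simp) rfl (by omega) (by intro j h1 h2; exact absurd h1 (by omega))
    simp only [List.map_cons, List.getD_cons_zero, List.length_cons, List.length_map,
      Nat.add_sub_cancel] at key
    exact hA.trans key.symm
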